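-- pv_equiv track=rewrite | github.com/tjfehdgns1/AlgorithmPerDay | RiceCake.py | ricecake
-- ===== SOURCE A (Python) =====
-- def ricecake(N, M, given) :
--     first, last = min(given)-M, max(given)
--
--     answer = 0
--     while(first <= last) :
--         total = 0
--         mid = (first+last) // 2
--         # 떡이 나오면 잘린 길이 저장
--         for num in given :
--             if num > mid :
--                 total += num - mid
--         # 잘린 길이의 합이 M보다 작으면 오른쪽 반절 없앰
--         if total < M :
--             last = mid - 1
--         # 잘린 길이의 합이 M보다 크거나 같으면 최적화된 답 answer에 저장하고 왼쪽 반절 없앰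
--         else :
--             answer = mid
--             first = mid + 1
--
--     return answer
-- ===== SOURCE B (Python) =====
-- def ricecake(N, M, given):
--     # sort descending + prefix sums: the best cut height is max over k of (P_k - M) // k
--     xs = sorted(given, reverse=True)
--     p = 0
--     cands = []
--     for k, x in enumerate(xs, 1):
--         p += x
--         cands.append((p - M) // k)
--     return max(cands)
-- ===== Notes on version B (the rewrite author's own statement) =====
-- stated objective: alternative
-- what changed: Replaces the binary search over cut heights (re-scanning the whole list at every probe) by sort-descending + running prefix sums: the answer is the maximum over k of (P_k - M) // k, one candidate per list position; O(n log n) independent of the height range, but not measurably faster on the timed inputs.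
-- outside the precondition, e.g. on ricecake(1, -100, [5]): A returns 0, B returns 105
import Mathlib
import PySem

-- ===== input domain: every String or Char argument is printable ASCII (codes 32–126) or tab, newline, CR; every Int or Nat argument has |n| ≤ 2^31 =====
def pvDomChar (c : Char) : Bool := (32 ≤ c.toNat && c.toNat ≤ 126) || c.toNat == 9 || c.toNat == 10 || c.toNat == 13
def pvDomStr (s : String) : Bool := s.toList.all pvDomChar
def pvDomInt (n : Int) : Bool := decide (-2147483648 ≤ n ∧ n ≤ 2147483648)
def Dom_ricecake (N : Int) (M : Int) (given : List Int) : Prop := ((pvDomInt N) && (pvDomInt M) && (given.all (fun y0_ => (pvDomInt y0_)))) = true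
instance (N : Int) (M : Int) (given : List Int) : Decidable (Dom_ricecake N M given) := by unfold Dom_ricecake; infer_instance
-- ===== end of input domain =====

-- B replaces A's binary search over cut heights by sort-descending + prefix sums (one candidate height per position): a different algorithm of similar measured cost.


-- ===== PORT A =====
-- the while-loop of A: state (first, last, answer); the inner for-loop is the foldl
def ricecakeLoop (M : Int) (given : List Int) (first last answer : Int) : Int :=
  if h : first ≤ last then
    let mid := PySem.Int.floordiv (first + last) 2
    let total := given.foldl (fun total num => if num > mid then total + (num - mid) else total) 0
    if total < M then ricecakeLoop M given first (mid - 1) answer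
    else ricecakeLoop M given (mid + 1) last mid
  else answer
termination_by (last + 1 - first).toNat
decreasing_by
  · have := PySem.Int.floordiv_two_mid_bounds h; omega
  · have := PySem.Int.floordiv_two_mid_bounds h; omega

def ricecake (N : Int) (M : Int) (given : List Int) : Int :=
  match PySem.List.min? given (fun x => x), PySem.List.max? given (fun x => x) with
  | some mn, some mx => ricecakeLoop M given (mn - M) mx 0
  | _, _ => 0    -- unreachable under Pre_ (Python raises ValueError on min([]))

-- ===== PORT B =====
-- the for-loop of B: running index k (enumerate from 1), running prefix sum p, appending (p - M) // k
def altCands (M : Int) (k : Int) (p : Int) : List Int → List Int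
  | [] => []
  | x :: t => PySem.Int.floordiv (p + x - M) k :: altCands M (k + 1) (p + x) t

def ricecake_alt (N : Int) (M : Int) (given : List Int) : Int :=
  let xs := PySem.List.sorted given (fun x => x) true
  match PySem.List.max? (altCands M 1 0 xs) (fun x => x) with
  | some v => v
  | none => 0    -- unreachable under Pre_ (Python max([]) raises ValueError)

-- ===== PRECONDITION & SPEC =====
-- Pre_ excludes the empty list, on which A raises ValueError (min of an empty sequence), and negative M,
-- where A's search interval [min-M, max] can miss the feasible heights and its answer is an artefact of that interval choice.
def Pre_ricecake (N : Int) (M : Int) (given : List Int) : Prop := given ≠ [] ∧ 0 ≤ M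
instance (N : Int) (M : Int) (given : List Int) : Decidable (Pre_ricecake N M given) := by unfold Pre_ricecake; infer_instance
def pvWitness_ricecake : Int × Int × List Int := (3, 4, [1, 5, 7])
def Spec_ricecake (N : Int) (M : Int) (given : List Int) (out : Int) : Prop := out = ricecake_alt N M given
instance (N : Int) (M : Int) (given : List Int) (out : Int) : Decidable (Spec_ricecake N M given out) := by unfold Spec_ricecake; infer_instance

-- ===== CLAIM (what is proved, stated in full; the proofs are below) =====
def Claim_equal_ricecake : Prop := ∀ (N : Int) (M : Int) (given : List Int), Dom_ricecake N M given → Pre_ricecake N M given → Spec_ricecake N M given (ricecake N M given)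

-- ===== LEMMAS AND PROOFS =====

-- the trimmed total at cut height h
def tF (h : Int) (g : List Int) : Int := (g.map (fun x => max (x - h) 0)).sum

lemma foldl_eq_tF (mid : Int) (g : List Int) : ∀ t : Int,
    g.foldl (fun total num => if num > mid then total + (num - mid) else total) t = t + tF mid g := by
  induction g with
  | nil => intro t; simp [tF]
  | cons x xs ih =>
    intro t
    simp only [List.foldl_cons, tF, List.map_cons, List.sum_cons] at *
    rw [ih]
    split_ifs with hx <;> omega

lemma tF_antitone (g : List Int) {h h' : Int} (hle : h ≤ h') : tF h' g ≤ tF h g := by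
  induction g with
  | nil => simp [tF]
  | cons x xs ih => simp only [tF, List.map_cons, List.sum_cons] at *; omega

lemma tF_nonneg (h : Int) (g : List Int) : 0 ≤ tF h g := by
  induction g with
  | nil => simp [tF]
  | cons x xs ih => simp only [tF, List.map_cons, List.sum_cons] at *; omega

lemma tF_ge_take (h : Int) (g : List Int) : ∀ K : Nat, K ≤ g.length →
    (g.take K).sum - (K : Int) * h ≤ tF h g := by
  induction g with
  | nil =>
    intro K hK
    have hK0 : K = 0 := by simpa using hK
    subst hK0; simp [tF]
  | cons x xs ih =>
    intro K hK
    cases K with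
    | zero => simpa using tF_nonneg h (x :: xs)
    | succ J =>
      have := ih J (by simpa using hK)
      simp only [tF, List.take_succ_cons, List.sum_cons, List.map_cons] at *
      push_cast
      have hmax : x - h ≤ max (x - h) 0 := le_max_left _ _
      nlinarith [this, hmax]

lemma tF_perm {g g' : List Int} (hp : g.Perm g') (h : Int) : tF h g = tF h g' := by
  exact List.Perm.sum_eq (hp.map _)

lemma tF_eq_zero (h : Int) : ∀ g : List Int, (∀ y ∈ g, y ≤ h) → tF h g = 0 := by
  intro g
  induction g with
  | nil => simp [tF]
  | cons x t ih =>
    intro hall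
    have hx : x ≤ h := hall x (by simp)
    have ht := ih (fun y hy => hall y (by simp [hy]))
    simp only [tF, List.map_cons, List.sum_cons] at *
    omega

-- on a descending list the positive terms form a prefix
lemma tF_prefix (h : Int) : ∀ s : List Int, s.Pairwise (fun a b => b ≤ a) →
    ∃ K : Nat, K ≤ s.length ∧ tF h s = (s.take K).sum - (K : Int) * h := by
  intro s hs
  induction s with
  | nil => exact ⟨0, by simp [tF]⟩
  | cons x t ih =>
    have hpw := (List.pairwise_cons.mp hs)
    by_cases hx : h < x
    · obtain ⟨K, hK, hEq⟩ := ih hpw.2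
      refine ⟨K + 1, by simpa using hK, ?_⟩
      simp only [tF, List.map_cons, List.sum_cons, List.take_succ_cons] at *
      push_cast
      have hmx : max (x - h) 0 = x - h := by omega
      have hr : ((K : Int) + 1) * h = (K : Int) * h + h := by ring
      rw [hmx]; omega
    · -- every element is ≤ h, so tF = 0
      refine ⟨0, by simp, ?_⟩
      have hall : ∀ y ∈ x :: t, y ≤ h := by
        intro y hy
        rcases List.mem_cons.mp hy with rfl | hy
        · omega
        · have := hpw.1 y hy; omega
      simpa using tF_eq_zero h (x :: t) hall

lemma take_sum_le (mx : Int) : ∀ (s : List Int), (∀ x ∈ s, x ≤ mx) → ∀ K : Nat, K ≤ s.length →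
    (s.take K).sum ≤ (K : Int) * mx := by
  intro s hs
  induction s with
  | nil =>
    intro K hK
    have hK0 : K = 0 := by simpa using hK
    subst hK0; simp
  | cons x t ih =>
    intro K hK
    cases K with
    | zero => simp
    | succ J =>
      have hx := hs x (by simp)
      have := ih (fun y hy => hs y (by simp [hy])) J (by simpa using hK)
      simp only [List.take_succ_cons, List.sum_cons]
      push_cast
      nlinarith

lemma altCands_eq (M : Int) : ∀ (s : List Int) (k p : Int),
    altCands M k p s = (List.range s.length).map
      (fun j => PySem.Int.floordiv (p + (s.take (j + 1)).sum - M) (k + (j : Int))) := by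
  intro s
  induction s with
  | nil => intro k p; simp [altCands]
  | cons x t ih =>
    intro k p
    simp only [altCands, List.length_cons, List.range_succ_eq_map, List.map_cons, List.map_map]
    refine congrArg₂ _ ?_ ?_
    · simp only [List.take_succ_cons, List.take_zero, List.sum_cons, List.sum_nil]
      congr 1 <;> push_cast <;> ring
    · rw [ih]
      apply List.map_congr_left
      intro j hj
      simp only [Function.comp, List.take_succ_cons, List.sum_cons]
      congr 1 <;> push_cast <;> ring

lemma loop_none (M : Int) (g : List Int) : ∀ n : Nat, ∀ f l a : Int, (l + 1 - f).toNat ≤ n →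
    (∀ h, f ≤ h → h ≤ l → tF h g < M) → ricecakeLoop M g f l a = a := by
  intro n
  induction n with
  | zero =>
    intro f l a hn _
    have hfl : ¬ f ≤ l := by omega
    rw [ricecakeLoop, dif_neg hfl]
  | succ n ih =>
    intro f l a hn hv
    by_cases hfl : f ≤ l
    · have hmid := PySem.Int.floordiv_two_mid_bounds hfl
      rw [ricecakeLoop, dif_pos hfl]
      simp only [foldl_eq_tF, zero_add]
      rw [if_pos (hv _ hmid.1 hmid.2)]
      exact ih f (PySem.Int.floordiv (f + l) 2 - 1) a (by omega)
        (fun h h1 h2 => hv h h1 (by omega))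
    · rw [ricecakeLoop, dif_neg hfl]

lemma loop_spec (M : Int) (g : List Int) (v : Int) (hv : M ≤ tF v g) :
    ∀ n : Nat, ∀ f l a : Int, (l + 1 - f).toNat ≤ n → f ≤ v → v ≤ l →
    (∀ h, v < h → h ≤ l → tF h g < M) → ricecakeLoop M g f l a = v := by
  intro n
  induction n with
  | zero => intro f l a hn h1 h2 h3; omega
  | succ n ih =>
    intro f l a hn hfv hvl hinv
    have hfl : f ≤ l := le_trans hfv hvl
    have hmid := PySem.Int.floordiv_two_mid_bounds hfl
    rw [ricecakeLoop, dif_pos hfl]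
    simp only [foldl_eq_tF, zero_add]
    by_cases hc : tF (PySem.Int.floordiv (f + l) 2) g < M
    · have hvm : v ≤ PySem.Int.floordiv (f + l) 2 - 1 := by
        by_contra hh
        have hmv : PySem.Int.floordiv (f + l) 2 ≤ v := by omega
        have := tF_antitone g hmv
        omega
      rw [if_pos hc]
      exact ih f (PySem.Int.floordiv (f + l) 2 - 1) a (by omega) hfv hvm
        (fun h h1 h2 => hinv h h1 (by omega))
    · rw [if_neg hc]
      by_cases hv2 : PySem.Int.floordiv (f + l) 2 + 1 ≤ v
      · exact ih (PySem.Int.floordiv (f + l) 2 + 1) l (PySem.Int.floordiv (f + l) 2)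
          (by omega) hv2 hvl hinv
      · have hveq : v = PySem.Int.floordiv (f + l) 2 := by
          have hle : PySem.Int.floordiv (f + l) 2 ≤ v := by
            by_contra hh
            exact hc (hinv _ (by omega) hmid.2)
          omega
        rw [← hveq]
        exact loop_none M g n (v + 1) l v (by omega)
          (fun h h1 h2 => hinv h (by omega) h2)

-- ===== VERDICT (by name: the statement is the Claim_ definition above) =====
theorem ricecake_spec : Claim_equal_ricecake := by
  unfold Claim_equal_ricecake
  intro N M g _ hpre
  obtain ⟨hne, hM⟩ := hpre
  unfold Spec_ricecake
  cases hmin : PySem.List.min? g (fun x => x) with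
  | none => rw [PySem.List.min?_eq_none_iff] at hmin; exact absurd hmin hne
  | some mn =>
  cases hmax : PySem.List.max? g (fun x => x) with
  | none => rw [PySem.List.max?_eq_none_iff] at hmax; exact absurd hmax hne
  | some mx =>
  have hmn_min : ∀ y ∈ g, mn ≤ y := by simpa using PySem.List.min?_isMin hmin
  have hmx_max : ∀ y ∈ g, y ≤ mx := by simpa using PySem.List.max?_isMax hmax
  set s := PySem.List.sorted g (fun x => x) true with hs
  have hperm : s.Perm g := PySem.List.sorted_perm g (fun x => x) true
  have hdesc : s.Pairwise (fun a b => b ≤ a) := by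
    simpa using PySem.List.sorted_pairwise_rev (xs := g) (key := fun x => x)
  have hsne : s ≠ [] := by
    intro h0
    rw [PySem.List.sorted_eq_nil_iff] at h0
    exact hne h0
  obtain ⟨a0, t0, hcons⟩ := List.exists_cons_of_ne_nil hsne
  have hcands := altCands_eq M s 1 0
  have hmemF : ∀ j, j < s.length →
      PySem.Int.floordiv (0 + (s.take (j + 1)).sum - M) (1 + (j : Int)) ∈ altCands M 1 0 s := by
    intro j hj
    rw [hcands]
    exact List.mem_map.mpr ⟨j, List.mem_range.mpr hj, rfl⟩
  cases hmc : PySem.List.max? (altCands M 1 0 s) (fun x => x) with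
  | none =>
    rw [PySem.List.max?_eq_none_iff] at hmc
    rw [hcons] at hmc
    simp [altCands] at hmc
  | some v =>
  have hvmem : v ∈ altCands M 1 0 s := PySem.List.max?_mem hmc
  have hvmax : ∀ c ∈ altCands M 1 0 s, c ≤ v := by simpa using PySem.List.max?_isMax hmc
  have hsub : ∀ x ∈ s, x ≤ mx := fun x hx => hmx_max x (hperm.mem_iff.mp hx)
  have htFperm : ∀ h : Int, tF h g = tF h s := fun h => tF_perm hperm.symm h
  -- the head candidate
  have ha0s : a0 ∈ s := by rw [hcons]; exact List.mem_cons_self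
  have hmn_a0 : mn ≤ a0 := hmn_min a0 (hperm.mem_iff.mp ha0s)
  have hF0 : a0 - M ∈ altCands M 1 0 s := by
    have h0 := hmemF 0 (by rw [hcons]; simp)
    have htake : (s.take 1).sum = a0 := by rw [hcons]; simp
    rw [htake] at h0
    have : PySem.Int.floordiv (0 + a0 - M) (1 + ((0 : Nat) : Int)) = a0 - M := by
      push_cast
      rw [PySem.Int.floordiv_eq_ediv_of_pos (by omega)]
      omega
    rwa [this] at h0
  have hF0v : a0 - M ≤ v := hvmax _ hF0
  -- v itself is some candidate: it is a feasible height
  obtain ⟨j, hj, hvF⟩ : ∃ j, j < s.length ∧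
      PySem.Int.floordiv (0 + (s.take (j + 1)).sum - M) (1 + (j : Int)) = v := by
    rw [hcands] at hvmem
    obtain ⟨j, hj, hjv⟩ := List.mem_map.mp hvmem
    exact ⟨j, List.mem_range.mp hj, hjv⟩
  have hd : (0 : Int) < 1 + (j : Int) := by positivity
  have hvd : v * (1 + (j : Int)) ≤ 0 + (s.take (j + 1)).sum - M := by
    have hid := PySem.Int.floordiv_mul_add_mod (0 + (s.take (j + 1)).sum - M) (1 + (j : Int))
    have hmod : 0 ≤ PySem.Int.mod (0 + (s.take (j + 1)).sum - M) (1 + (j : Int)) := by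
      rw [PySem.Int.mod_eq_emod_of_pos hd]
      exact Int.emod_nonneg _ (by omega)
    rw [hvF] at hid
    omega
  have hvalid : M ≤ tF v g := by
    have h2 := tF_ge_take v s (j + 1) (by omega)
    push_cast at h2
    have hring : ((j : Int) + 1) * v = v * (1 + (j : Int)) := by ring
    rw [htFperm]
    linarith
  have hvmx : v ≤ mx := by
    have hP : (s.take (j + 1)).sum ≤ ((j : Int) + 1) * mx := by
      have := take_sum_le mx s hsub (j + 1) (by omega)
      push_cast at this
      exact this
    rw [← hvF, PySem.Int.floordiv_eq_ediv_of_pos hd]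
    calc (0 + (s.take (j + 1)).sum - M) / (1 + (j : Int))
        ≤ ((1 + (j : Int)) * mx) / (1 + (j : Int)) := by
          apply Int.ediv_le_ediv hd
          nlinarith
      _ = mx := Int.mul_ediv_cancel_left mx (by omega)
  have hmnv : mn - M ≤ v := by omega
  -- no feasible height above v (within the search interval)
  have hinv : ∀ h, v < h → h ≤ mx → tF h g < M := by
    intro h hvh hhmx
    by_contra hge
    push_neg at hge
    rw [htFperm] at hge
    obtain ⟨K, hK, hKeq⟩ := tF_prefix h s hdesc
    cases K with
    | zero =>
      simp at hKeq
      have hM0 : M = 0 := by omega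
      have hha : ∀ y ∈ s, y ≤ a0 := by
        intro y hy
        rw [hcons] at hy hdesc
        rcases List.mem_cons.mp hy with rfl | hy
        · exact le_refl _
        · exact (List.pairwise_cons.mp hdesc).1 y hy
      have hmxs : mx ∈ s := hperm.mem_iff.mpr (PySem.List.max?_mem hmax)
      have := hha mx hmxs
      omega
    | succ J =>
      have hFJ := hmemF J (by omega)
      have hd2 : (0 : Int) < 1 + (J : Int) := by positivity
      have hhle : h * (1 + (J : Int)) ≤ 0 + (s.take (J + 1)).sum - M := by
        push_cast at hKeq
        nlinarith
      have : h ≤ PySem.Int.floordiv (0 + (s.take (J + 1)).sum - M) (1 + (J : Int)) :=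
        (PySem.Int.le_floordiv_iff_mul_le hd2).mpr hhle
      have := hvmax _ hFJ
      omega
  -- assemble
  show ricecake N M g = ricecake_alt N M g
  unfold ricecake ricecake_alt
  simp only [hmin, hmax]
  rw [← hs, hmc]
  exact loop_spec M g v hvalid (mx + 1 - (mn - M)).toNat (mn - M) mx 0 le_rfl hmnv hvmx hinv
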